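-- pv_equiv track=rewrite | github.com/adityaramvakacherla-prog/KATALYST-pro | server.py | count_progress
-- ===== SOURCE A (Python) =====
-- def count_progress(project):
--     """Counts completed, total, failed, and active tasks in the project."""
--     if not project: return 0, 0, 0, 0
--     total = completed = failed = active = 0
--     for phase in project.get("phases", []):
--         for task in phase.get("tasks", []):
--             total += 1
--             s = task.get("status", "pending")
--             if s in ("complete", "verified"): completed += 1
--             elif s == "failed":  failed += 1
--             elif s == "in_progress": active += 1
--     return completed, total, failed, active
-- ===== SOURCE B (Python) =====
-- def count_progress(project):
--     """Counts completed, total, failed, and active tasks in the project."""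
--     if not project: return 0, 0, 0, 0
--     statuses = [t.get("status", "pending")
--                 for phase in project.get("phases", [])
--                 for t in phase.get("tasks", [])]
--     c = {}
--     for s in statuses:
--         c[s] = c.get(s, 0) + 1
--     return (c.get("complete", 0) + c.get("verified", 0), len(statuses),
--             c.get("failed", 0), c.get("in_progress", 0))
-- ===== Notes on version B (the rewrite author's own statement) =====
-- stated objective: idiomatic
-- what changed: Replaces the per-task if/elif classification chain and four running counters with building a flat status list and a frequency table in one pass, then deriving the four outputs by table lookups (completed = complete+verified counts, total = list length).
import Mathlib
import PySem

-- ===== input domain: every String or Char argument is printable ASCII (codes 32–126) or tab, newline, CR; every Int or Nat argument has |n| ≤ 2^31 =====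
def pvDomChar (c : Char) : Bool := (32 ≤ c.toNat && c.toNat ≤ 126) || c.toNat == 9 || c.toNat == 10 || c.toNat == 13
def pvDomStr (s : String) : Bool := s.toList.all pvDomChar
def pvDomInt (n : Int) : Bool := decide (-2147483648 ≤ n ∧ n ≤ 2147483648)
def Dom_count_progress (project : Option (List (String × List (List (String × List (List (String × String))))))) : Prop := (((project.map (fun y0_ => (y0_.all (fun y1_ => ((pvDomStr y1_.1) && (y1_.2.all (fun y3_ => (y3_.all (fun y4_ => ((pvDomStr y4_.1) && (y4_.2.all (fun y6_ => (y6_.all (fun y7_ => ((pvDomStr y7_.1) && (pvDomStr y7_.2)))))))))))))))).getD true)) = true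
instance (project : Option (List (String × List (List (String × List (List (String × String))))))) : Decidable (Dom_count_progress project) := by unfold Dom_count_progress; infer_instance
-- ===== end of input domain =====

-- B replaces A's per-task if/elif chain and four running counters with a flat status list,
-- a frequency table built in one pass, and four table lookups (idiomatic; same cost).

-- ===== PORT A =====
def count_progress (project : Option (List (String × List (List (String × List (List (String × String))))))) : Int × Int × Int × Int :=
  match project with
  | none => (0, 0, 0, 0)
  | some proj =>
    if proj.isEmpty then (0, 0, 0, 0)
    else
      ((PySem.Dict.mk proj).getD "phases" []).foldl (fun acc phase =>
        ((PySem.Dict.mk phase).getD "tasks" []).foldl (fun acc task =>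
          let total := acc.2.1 + 1
          let s := (PySem.Dict.mk task).getD "status" "pending"
          if s == "complete" || s == "verified" then (acc.1 + 1, total, acc.2.2.1, acc.2.2.2)
          else if s == "failed" then (acc.1, total, acc.2.2.1 + 1, acc.2.2.2)
          else if s == "in_progress" then (acc.1, total, acc.2.2.1, acc.2.2.2 + 1)
          else (acc.1, total, acc.2.2.1, acc.2.2.2)) acc) (0, 0, 0, 0)

-- ===== PORT B =====
def count_progress_alt (project : Option (List (String × List (List (String × List (List (String × String))))))) : Int × Int × Int × Int :=
  match project with
  | none => (0, 0, 0, 0)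
  | some proj =>
    if proj.isEmpty then (0, 0, 0, 0)
    else
      let statuses :=
        ((PySem.Dict.mk proj).getD "phases" []).flatMap (fun phase =>
          ((PySem.Dict.mk phase).getD "tasks" []).map (fun task =>
            (PySem.Dict.mk task).getD "status" "pending"))
      let c : PySem.Dict String Int :=
        statuses.foldl (fun d s => d.insert s (d.getD s 0 + 1)) PySem.Dict.empty
      (c.getD "complete" 0 + c.getD "verified" 0, (statuses.length : Int),
       c.getD "failed" 0, c.getD "in_progress" 0)

-- ===== PRECONDITION & SPEC =====
abbrev PvProject := Option (List (String × List (List (String × List (List (String × String))))))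
def Spec_count_progress (project : Option (List (String × List (List (String × List (List (String × String))))))) (out : Int × Int × Int × Int) : Prop := out = count_progress_alt project
instance (project : PvProject) (out : Int × Int × Int × Int) : Decidable (Spec_count_progress project out) := by unfold Spec_count_progress; infer_instance

-- ===== CLAIM (what is proved, stated in full; the proofs are below) =====
def Claim_equal_count_progress : Prop := ∀ (project : Option (List (String × List (List (String × List (List (String × String))))))), Dom_count_progress project → Spec_count_progress project (count_progress project)

-- ===== LEMMAS AND PROOFS =====

-- A's per-status step (what A's inner loop body does once the status has been read).
def pvStepA (acc : Int × Int × Int × Int) (s : String) : Int × Int × Int × Int :=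
  if s == "complete" || s == "verified" then (acc.1 + 1, acc.2.1 + 1, acc.2.2.1, acc.2.2.2)
  else if s == "failed" then (acc.1, acc.2.1 + 1, acc.2.2.1 + 1, acc.2.2.2)
  else if s == "in_progress" then (acc.1, acc.2.1 + 1, acc.2.2.1, acc.2.2.2 + 1)
  else (acc.1, acc.2.1 + 1, acc.2.2.1, acc.2.2.2)

-- Folding a nested structure is folding its flattening.
theorem pvFoldl_flatMap {α β γ : Type} (l : List α) (g : α → List β)
    (f : γ → β → γ) (a : γ) :
    (l.flatMap g).foldl f a = l.foldl (fun a x => (g x).foldl f a) a := by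
  induction l generalizing a with
  | nil => rfl
  | cons h t ih => simp [List.flatMap_cons, List.foldl_append, ih]

-- A's fold over a list of statuses, in closed form by counts.
theorem pvFoldA_counts (l : List String) (acc : Int × Int × Int × Int) :
    l.foldl pvStepA acc =
      (acc.1 + l.count "complete" + l.count "verified",
       acc.2.1 + l.length,
       acc.2.2.1 + l.count "failed",
       acc.2.2.2 + l.count "in_progress") := by
  induction l generalizing acc with
  | nil => simp
  | cons s t ih =>
    simp only [List.foldl_cons, ih, List.count_cons, List.length_cons]
    by_cases h1 : s = "complete"
    · subst h1; simp [pvStepA]; omega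
    · by_cases h2 : s = "verified"
      · subst h2; simp [pvStepA]; omega
      · by_cases h3 : s = "failed"
        · subst h3; simp [pvStepA]; omega
        · by_cases h4 : s = "in_progress"
          · subst h4; simp [pvStepA]; omega
          · simp [pvStepA, h1, h2, h3, h4]
            omega

theorem pvEquiv (project : Option (List (String × List (List (String × List (List (String × String))))))) :
    count_progress project = count_progress_alt project := by
  cases project with
  | none => rfl
  | some proj =>
    by_cases hp : proj.isEmpty
    · simp [count_progress, count_progress_alt, hp]
    · simp only [count_progress, count_progress_alt, hp, Bool.false_eq_true, if_false]
      -- A's nested loops = one fold of pvStepA over the flattened status list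
      have hA : ∀ (phases : List (List (String × List (List (String × String)))))
          (acc : Int × Int × Int × Int),
          phases.foldl (fun acc phase =>
            ((PySem.Dict.mk phase).getD "tasks" []).foldl (fun acc task =>
              let total := acc.2.1 + 1
              let s := (PySem.Dict.mk task).getD "status" "pending"
              if s == "complete" || s == "verified" then (acc.1 + 1, total, acc.2.2.1, acc.2.2.2)
              else if s == "failed" then (acc.1, total, acc.2.2.1 + 1, acc.2.2.2)
              else if s == "in_progress" then (acc.1, total, acc.2.2.1, acc.2.2.2 + 1)
              else (acc.1, total, acc.2.2.1, acc.2.2.2)) acc) acc =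
          (phases.flatMap (fun phase =>
            ((PySem.Dict.mk phase).getD "tasks" []).map (fun task =>
              (PySem.Dict.mk task).getD "status" "pending"))).foldl pvStepA acc := by
        intro phases acc
        rw [pvFoldl_flatMap]
        congr 1
        funext acc phase
        rw [List.foldl_map]
        rfl
      rw [hA, pvFoldA_counts]
      simp [PySem.Dict.getD_foldl_insert_add_one, PySem.Dict.getD_empty]

-- ===== VERDICT (by name: the statement is the Claim_ definition above) =====
theorem count_progress_spec : Claim_equal_count_progress := by
  intro project _
  unfold Spec_count_progress
  exact pvEquiv project
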